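-- pv_equiv track=rewrite | github.com/jongwooo/algorithm | 프로그래머스/1/42840. 모의고사/모의고사.py | solution
-- ===== SOURCE A (Python) =====
-- def solution(answers):
--     one = (1, 2, 3, 4, 5)
--     two = (2, 1, 2, 3, 2, 4, 2, 5)
--     three = (3, 3, 1, 1, 2, 2, 4, 4, 5, 5)
--     corrects = [0, 0, 0]
--     for i, answer in enumerate(answers):
--         if answer == one[(i + 5) % 5]:
--             corrects[0] += 1
--         if answer == two[(i + 8) % 8]:
--             corrects[1] += 1
--         if answer == three[(i + 10) % 10]:
--             corrects[2] += 1
--     max_score = max(corrects)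
--     result = []
--     for i in range(3):
--         if corrects[i] == max_score:
--             result.append(i + 1)
--     return result
-- ===== SOURCE B (Python) =====
-- def solution(answers):
--     patterns = [(1, 2, 3, 4, 5), (2, 1, 2, 3, 2, 4, 2, 5), (3, 3, 1, 1, 2, 2, 4, 4, 5, 5)]
--     # One tally pass: count occurrences of each (position mod 40, answer) pair.
--     # 40 = lcm(5, 8, 10), so every pattern's prediction depends only on i % 40;
--     # each score is then 40 constant-time lookups, without rescanning answers.
--     tally = {}
--     for i, a in enumerate(answers):
--         key = (i % 40, a)
--         tally[key] = tally.get(key, 0) + 1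
--     scores = [sum(tally.get((r, p[r % len(p)]), 0) for r in range(40))
--               for p in patterns]
--     best = max(scores)
--     return [i + 1 for i, s in enumerate(scores) if s == best]
-- ===== Notes on version B (the rewrite author's own statement) =====
-- stated objective: alternative
-- what changed: Replaces per-answer comparison against the three cyclic patterns with a frequency table: one pass tallies (index mod 40, answer) pairs (40 = lcm of the pattern periods), then each pattern's score is the sum of 40 table lookups instead of a scan of the answers.
import Mathlib
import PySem

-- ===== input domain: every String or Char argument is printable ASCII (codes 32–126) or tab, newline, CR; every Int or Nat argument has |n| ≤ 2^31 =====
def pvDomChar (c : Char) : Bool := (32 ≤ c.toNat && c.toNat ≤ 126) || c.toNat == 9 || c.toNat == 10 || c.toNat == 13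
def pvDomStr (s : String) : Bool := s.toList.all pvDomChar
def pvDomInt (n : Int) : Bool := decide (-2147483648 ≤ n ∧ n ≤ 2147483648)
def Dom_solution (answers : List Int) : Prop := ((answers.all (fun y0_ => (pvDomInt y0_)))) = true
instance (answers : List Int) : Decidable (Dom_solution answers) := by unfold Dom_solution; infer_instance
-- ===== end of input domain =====

-- B replaces per-answer comparison against the cyclic patterns with a frequency table of
-- (index mod 40, answer) pairs (40 = lcm of the pattern periods); return value only.

-- ===== PORT A =====
-- the loop body of A's single for-loop (three independent ifs, in order)
def aStep (c : Int × Int × Int) (p : Int × Int) : Int × Int × Int :=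
  let c := if p.2 = PySem.List.pyGetD ([1,2,3,4,5] : List Int) (PySem.Int.mod (p.1 + 5) 5) 0
           then (c.1 + 1, c.2.1, c.2.2) else c
  let c := if p.2 = PySem.List.pyGetD ([2,1,2,3,2,4,2,5] : List Int) (PySem.Int.mod (p.1 + 8) 8) 0
           then (c.1, c.2.1 + 1, c.2.2) else c
  if p.2 = PySem.List.pyGetD ([3,3,1,1,2,2,4,4,5,5] : List Int) (PySem.Int.mod (p.1 + 10) 10) 0
  then (c.1, c.2.1, c.2.2 + 1) else c

def solution (answers : List Int) : List Int :=
  let corrects := (PySem.List.enumerate answers).foldl aStep (0, 0, 0)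
  let cs : List Int := [corrects.1, corrects.2.1, corrects.2.2]
  let max_score := (PySem.List.max? cs (fun y => y)).getD 0
  (List.range 3).foldl (fun r i => if cs.getD i 0 = max_score then r ++ [(i : Int) + 1] else r) []

-- ===== PORT B =====
-- tally[(i % 40, a)] += 1 over enumerate(answers)
def bTally (answers : List Int) : PySem.Dict (Int × Int) Int :=
  (PySem.List.enumerate answers).foldl
    (fun d q =>
      let k : Int × Int := (PySem.Int.mod q.1 40, q.2)
      d.insert k (d.getD k 0 + 1)) PySem.Dict.empty

-- sum(tally.get((r, p[r % len(p)]), 0) for r in range(40))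
def bScore (tally : PySem.Dict (Int × Int) Int) (p : List Int) : Int :=
  ((PySem.List.pyRange 0 40 1).map
    (fun r => tally.getD (r, PySem.List.pyGetD p (PySem.Int.mod r (p.length : Int)) 0) 0)).sum

def solution_alt (answers : List Int) : List Int :=
  let patterns : List (List Int) := [[1,2,3,4,5], [2,1,2,3,2,4,2,5], [3,3,1,1,2,2,4,4,5,5]]
  let tally := bTally answers
  let scores := patterns.map (bScore tally)
  let best := (PySem.List.max? scores (fun y => y)).getD 0
  (PySem.List.enumerate scores).filterMap (fun q => if q.2 = best then some (q.1 + 1) else none)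

-- ===== PRECONDITION & SPEC =====
def Spec_solution (answers : List Int) (out : List Int) : Prop := out = solution_alt answers
instance (answers : List Int) (out : List Int) : Decidable (Spec_solution answers out) := by unfold Spec_solution; infer_instance

-- ===== CLAIM (what is proved, stated in full; the proofs are below) =====
def Claim_equal_solution : Prop := ∀ (answers : List Int), Dom_solution answers → Spec_solution answers (solution answers)

-- ===== LEMMAS AND PROOFS =====

-- shifting the numerator by the (positive) divisor does not change Python's mod
lemma mod_shift (i d : Int) (hd : 0 < d) : PySem.Int.mod (i + d) d = PySem.Int.mod i d := by
  rw [PySem.Int.mod_eq_emod_of_pos hd, PySem.Int.mod_eq_emod_of_pos hd, Int.add_mul_emod_self_left i d 1 |>.symm.trans rfl]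
  simp

-- reducing mod 40 first does not change mod L when L divides 40
lemma mod_mod_40 (i L : Int) (hL : 0 < L) (hdvd : L ∣ 40) :
    PySem.Int.mod (PySem.Int.mod i 40) L = PySem.Int.mod i L := by
  rw [PySem.Int.mod_eq_emod_of_pos hL, PySem.Int.mod_eq_emod_of_pos hL,
    PySem.Int.mod_eq_emod_of_pos (by norm_num : (0:Int) < 40)]
  exact Int.emod_emod_of_dvd i hdvd

-- A's interleaved fold computes the three per-pattern counts independently
lemma foldA_eq (answers : List Int) : ∀ (k : Int) (c : Int × Int × Int),
    (PySem.List.enumerate answers k).foldl aStep c =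
      (c.1 + ((PySem.List.enumerate answers k).countP
          (fun q => q.2 == PySem.List.pyGetD ([1,2,3,4,5] : List Int) (PySem.Int.mod q.1 5) 0) : Nat),
       c.2.1 + ((PySem.List.enumerate answers k).countP
          (fun q => q.2 == PySem.List.pyGetD ([2,1,2,3,2,4,2,5] : List Int) (PySem.Int.mod q.1 8) 0) : Nat),
       c.2.2 + ((PySem.List.enumerate answers k).countP
          (fun q => q.2 == PySem.List.pyGetD ([3,3,1,1,2,2,4,4,5,5] : List Int) (PySem.Int.mod q.1 10) 0) : Nat)) := by
  induction answers with
  | nil => intro k c; simp [PySem.List.enumerate_nil]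
  | cons x xs ih =>
    intro k c
    rw [PySem.List.enumerate_cons, List.foldl_cons, ih]
    simp only [List.countP_cons, beq_iff_eq]
    unfold aStep
    dsimp only
    rw [mod_shift k 5 (by norm_num), mod_shift k 8 (by norm_num), mod_shift k 10 (by norm_num)]
    split_ifs with h1 h2 h3 h3' h2' h3'' h3''' <;>
      (simp only [Prod.mk.injEq]; refine ⟨?_, ?_, ?_⟩ <;> push_cast <;> ring)

-- one-hot: among the 40 residue buckets, a pair x with 0 ≤ x.1 < 40 is counted exactly
-- where r = x.1, and then iff its value matches f x.1
lemma onehot (f : Int → Int) (x : Int × Int) (h0 : 0 ≤ x.1) (h40 : x.1 < 40) :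
    (∑ r ∈ Finset.range 40, if x = (((r : Nat) : Int), f r) then 1 else 0) =
      (if x.2 = f x.1 then 1 else 0 : Nat) := by
  obtain ⟨a, b⟩ := x
  simp only at h0 h40 ⊢
  rw [Finset.sum_eq_single a.toNat]
  · have ha : ((a.toNat : Nat) : Int) = a := Int.toNat_of_nonneg h0
    rw [ha]
    by_cases hb : b = f a
    · simp [hb]
    · simp [Prod.ext_iff, hb]
  · intro r _ hr
    have : a ≠ ((r : Nat) : Int) := by omega
    simp [Prod.ext_iff, this]
  · intro hmem
    exfalso; apply hmem; simp [Finset.mem_range]; omega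

-- partition by residue: summing per-bucket pair counts recovers the match count
lemma sum_count_eq_countP (f : Int → Int) (K : List (Int × Int))
    (hK : ∀ q ∈ K, 0 ≤ q.1 ∧ q.1 < 40) :
    (∑ r ∈ Finset.range 40, K.count (((r : Nat) : Int), f r)) =
      K.countP (fun q => q.2 == f q.1) := by
  induction K with
  | nil => simp
  | cons x xs ih =>
    have hx := hK x (List.mem_cons_self)
    have hxs : ∀ q ∈ xs, 0 ≤ q.1 ∧ q.1 < 40 := fun q hq => hK q (List.mem_cons_of_mem x hq)
    simp only [List.count_cons, List.countP_cons, beq_iff_eq]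
    rw [Finset.sum_add_distrib, ih hxs]
    have := onehot f x hx.1 hx.2
    simp only at *
    omega

-- casting a Nat-valued sum over range 40 into Int
lemma cast_sum_range40 (c : Nat → Nat) :
    ((List.range 40).map (fun r => (c r : Int))).sum = ((∑ r ∈ Finset.range 40, c r : Nat) : Int) := by
  have h : ∀ l : List Nat, (l.map (fun x : Nat => (x : Int))).sum = ((l.sum : Nat) : Int) := by
    intro l; induction l with
    | nil => simp
    | cons x xs ihl => simp only [List.map_cons, List.sum_cons, ihl]; push_cast; ring
  rw [show (∑ r ∈ Finset.range 40, c r) = ((List.range 40).map c).sum from rfl, ← h, List.map_map]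
  rfl

-- the tally's value at a key is the number of occurrences of that key pair
lemma tally_getD (answers : List Int) (v : Int × Int) :
    (bTally answers).getD v 0 =
      (((PySem.List.enumerate answers).map (fun q => (PySem.Int.mod q.1 40, q.2))).count v : Int) := by
  have h : bTally answers =
      ((PySem.List.enumerate answers).map (fun q => (PySem.Int.mod q.1 40, q.2))).foldl
        (fun d k => d.insert k (d.getD k 0 + 1)) PySem.Dict.empty := by
    rw [List.foldl_map]; rfl
  rw [h]
  simp [PySem.Dict.getD_foldl_insert_add_one]

-- B's per-pattern score equals A's per-pattern match count
lemma score_eq (answers : List Int) (p : List Int) (hlen : 0 < (p.length : Int))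
    (hdvd : (p.length : Int) ∣ 40) :
    bScore (bTally answers) p =
      ((PySem.List.enumerate answers).countP
        (fun q => q.2 == PySem.List.pyGetD p (PySem.Int.mod q.1 (p.length : Int)) 0) : Nat) := by
  unfold bScore
  set f : Int → Int := fun r => PySem.List.pyGetD p (PySem.Int.mod r (p.length : Int)) 0 with hf
  set K : List (Int × Int) := (PySem.List.enumerate answers).map (fun q => (PySem.Int.mod q.1 40, q.2)) with hKdef
  have hpr : PySem.List.pyRange 0 40 1 = (List.range 40).map (fun n : Nat => (n : Int)) := by decide
  have h1 : (PySem.List.pyRange 0 40 1).map (fun r => (bTally answers).getD (r, f r) 0)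
      = (List.range 40).map (fun r : Nat => (K.count (((r : Nat) : Int), f r) : Int)) := by
    rw [hpr, List.map_map]
    apply List.map_congr_left
    intro r _
    simp only [Function.comp]
    rw [tally_getD]
  rw [h1, cast_sum_range40 (fun r => K.count (((r : Nat) : Int), f r))]
  have hK : ∀ q ∈ K, 0 ≤ q.1 ∧ q.1 < 40 := by
    intro q hq
    rw [hKdef] at hq
    obtain ⟨q', _, rfl⟩ := List.mem_map.mp hq
    exact ⟨PySem.Int.mod_nonneg _ (by norm_num), PySem.Int.mod_lt _ (by norm_num)⟩
  rw [sum_count_eq_countP f K hK, hKdef, List.countP_map]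
  have hpred : ((fun q : Int × Int => q.2 == f q.1) ∘ fun q : Int × Int => (PySem.Int.mod q.1 40, q.2))
      = (fun q : Int × Int => q.2 == PySem.List.pyGetD p (PySem.Int.mod q.1 (p.length : Int)) 0) := by
    funext q
    simp only [Function.comp, hf]
    rw [mod_mod_40 q.1 (p.length : Int) hlen hdvd]
  rw [hpred]

-- evaluating the winner-collection on a concrete three-element score list
lemma tail_eq (m s1 s2 s3 : Int) :
    (List.range 3).foldl
      (fun r i => if List.getD [s1, s2, s3] i 0 = m then r ++ [(i : Int) + 1] else r) [] =
    (PySem.List.enumerate [s1, s2, s3] 0).filterMap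
      (fun q => if q.2 = m then some (q.1 + 1) else none) := by
  have hr : List.range 3 = [0, 1, 2] := rfl
  rw [hr, PySem.List.enumerate_cons, PySem.List.enumerate_cons, PySem.List.enumerate_cons,
    PySem.List.enumerate_nil]
  simp only [List.foldl_cons, List.foldl_nil, List.filterMap_cons, List.filterMap_nil]
  norm_num
  split_ifs <;> norm_num

theorem solution_equal (answers : List Int) : solution answers = solution_alt answers := by
  have e1 := score_eq answers [1,2,3,4,5] (by norm_num) (by norm_num)
  have e2 := score_eq answers [2,1,2,3,2,4,2,5] (by norm_num) (by norm_num)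
  have e3 := score_eq answers [3,3,1,1,2,2,4,4,5,5] (by norm_num) (by norm_num)
  unfold solution solution_alt
  dsimp only
  rw [foldA_eq answers 0 (0, 0, 0)]
  simp only [List.map_cons, List.map_nil, e1, e2, e3]
  norm_num
  exact tail_eq _ _ _ _

-- ===== VERDICT (by name: the statement is the Claim_ definition above) =====
theorem solution_spec : Claim_equal_solution := by
  intro answers _
  unfold Spec_solution
  exact solution_equal answers
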